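-- pv_equiv track=rewrite | github.com/berkeliumsilic/Upwork-Project-PDF-Analyzer | main.py | get_groups_from_lines
-- ===== SOURCE A (Python) =====
-- def get_groups_from_lines(lines):
--     groups = []
--     lst = []
--     for line in lines:
--         lst.append(line)
--         if '@' in line:
--             groups.append(lst)
--             lst = []
--     return groups
-- ===== SOURCE B (Python) =====
-- def get_groups_from_lines(lines):
--     lines = list(lines)
--     groups = []
--     start = 0
--     for i, line in enumerate(lines):
--         if '@' in line:
--             groups.append(lines[start:i + 1])
--             start = i + 1
--     return groups
-- ===== Notes on version B (the rewrite author's own statement) =====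
-- stated objective: alternative
-- what changed: B keeps only a boundary index and emits each group as one slice lines[start:i+1] when a line contains '@', instead of appending every line to a growing per-group accumulator that is flushed and reset.
import Mathlib
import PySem

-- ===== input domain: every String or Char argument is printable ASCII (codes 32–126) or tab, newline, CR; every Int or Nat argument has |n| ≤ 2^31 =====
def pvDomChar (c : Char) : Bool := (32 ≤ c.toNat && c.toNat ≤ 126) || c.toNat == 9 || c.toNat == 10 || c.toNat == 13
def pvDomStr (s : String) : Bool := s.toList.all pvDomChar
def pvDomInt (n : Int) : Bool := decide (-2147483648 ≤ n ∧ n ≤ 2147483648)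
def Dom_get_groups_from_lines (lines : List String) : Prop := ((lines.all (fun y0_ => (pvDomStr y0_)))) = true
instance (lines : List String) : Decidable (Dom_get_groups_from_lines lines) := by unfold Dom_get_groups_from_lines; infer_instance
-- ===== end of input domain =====

-- B replaces A's growing per-group accumulator by a boundary index plus slices lines[start:i+1]; alternative decomposition, same cost.


-- ===== PORT A =====
def get_groups_from_lines (lines : List String) : List (List String) :=
  (lines.foldl
    (fun (st : List (List String) × List String) (line : String) =>
      let lst := st.2 ++ [line]
      if PySem.Str.isIn "@" line then (st.1 ++ [lst], ([] : List String))
      else (st.1, lst))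
    (([] : List (List String)), ([] : List String))).1

-- ===== PORT B =====
def get_groups_from_lines_alt (lines : List String) : List (List String) :=
  ((PySem.List.enumerate lines 0).foldl
    (fun (st : List (List String) × Int) (p : Int × String) =>
      if PySem.Str.isIn "@" p.2 then
        (st.1 ++ [PySem.List.slice lines (some st.2) (some (p.1 + 1))], p.1 + 1)
      else st)
    (([] : List (List String)), (0 : Int))).1

-- ===== PRECONDITION & SPEC =====
def Spec_get_groups_from_lines (lines : List String) (out : List (List String)) : Prop := out = get_groups_from_lines_alt lines
instance (lines : List String) (out : List (List String)) : Decidable (Spec_get_groups_from_lines lines out) := by unfold Spec_get_groups_from_lines; infer_instance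

-- ===== CLAIM (what is proved, stated in full; the proofs are below) =====
def Claim_equal_get_groups_from_lines : Prop := ∀ (lines : List String), Dom_get_groups_from_lines lines → Spec_get_groups_from_lines lines (get_groups_from_lines lines)

-- ===== LEMMAS AND PROOFS =====

-- Loop invariant: with i0 the absolute index of the first unprocessed line and s the
-- boundary index of B, A's accumulator lst is exactly the slice lines[s:i0].
theorem pv_loop_eq (rest : List String) : ∀ (lines : List String) (g : List (List String)) (s i0 : Nat),
    s ≤ i0 → rest = lines.drop i0 →
    (rest.foldl
      (fun (st : List (List String) × List String) (line : String) =>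
        let lst := st.2 ++ [line]
        if PySem.Str.isIn "@" line then (st.1 ++ [lst], ([] : List String))
        else (st.1, lst))
      (g, (lines.drop s).take (i0 - s))).1
    = ((PySem.List.enumerate rest (i0 : Int)).foldl
        (fun (st : List (List String) × Int) (p : Int × String) =>
          if PySem.Str.isIn "@" p.2 then
            (st.1 ++ [PySem.List.slice lines (some st.2) (some (p.1 + 1))], p.1 + 1)
          else st)
        (g, (s : Int))).1 := by
  induction rest with
  | nil => intro lines g s i0 _ _; simp [PySem.List.enumerate]
  | cons x r ih =>
    intro lines g s i0 hs hdrop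
    have hext : (lines.drop s).take (i0 - s) ++ [x] = (lines.drop s).take (i0 + 1 - s) := by
      have h1 : lines.drop i0 = (lines.drop s).drop (i0 - s) := by
        rw [List.drop_drop]; congr 1; omega
      have h2 : i0 + 1 - s = (i0 - s) + 1 := by omega
      rw [h2, List.take_add, h1.symm.trans hdrop.symm]
      simp
    rw [PySem.List.enumerate_cons]
    simp only [List.foldl_cons]
    have hdrop' : r = lines.drop (i0 + 1) := by
      rw [← List.drop_drop]; rw [← hdrop]; simp
    by_cases hin : PySem.Str.isIn "@" x
    · simp only [hin, if_pos]
      have hcast : (i0 : Int) + 1 = ((i0 + 1 : Nat) : Int) := by push_cast; ring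
      have hsl : PySem.List.slice lines (some (s : Int)) (some ((i0 : Int) + 1))
          = (lines.drop s).take (i0 + 1 - s) := by
        rw [hcast, PySem.List.slice_natCast]
      rw [hext]
      have h2 := ih lines (g ++ [(lines.drop s).take (i0 + 1 - s)]) (i0 + 1) (i0 + 1)
        (le_refl _) hdrop'
      simp only [Nat.sub_self, List.take_zero] at h2
      rw [h2, hsl, hcast]
    · simp only [hin, Bool.false_eq_true, if_false]
      rw [hext]
      have := ih lines g s (i0 + 1) (by omega) hdrop'
      rw [this]
      have hcast : (i0 : Int) + 1 = ((i0 + 1 : Nat) : Int) := by push_cast; ring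
      rw [hcast]

-- ===== VERDICT (by name: the statement is the Claim_ definition above) =====
theorem get_groups_from_lines_spec : Claim_equal_get_groups_from_lines := by
  intro lines _
  show get_groups_from_lines lines = get_groups_from_lines_alt lines
  unfold get_groups_from_lines get_groups_from_lines_alt
  have := pv_loop_eq lines lines [] 0 0 (le_refl _) (by simp)
  simpa using this
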